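-- pv_equiv track=rewrite | github.com/ayush-garg341/python | data_structures/daily_challenges/same_bsts.py | check_same_bst_or_not_rec
-- ===== SOURCE A (Python) =====
-- def check_same_bst_or_not_rec(arr1, arr2):
--
--     if len(arr1) != len(arr2):
--         return False
--
--     if len(arr1) == 0 or len(arr2) == 0:
--         return True
--
--     if arr1[0] != arr2[0]:
--         return False
--
--     left_tree_arr_1 = [num for num in arr1[1:] if num < arr1[0]]
--     left_tree_arr_2 = [num for num in arr2[1:] if num < arr2[0]]
--
--     right_tree_arr_1 = [num for num in arr1[1:] if num >= arr1[0]]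
--     right_tree_arr_2 = [num for num in arr2[1:] if num >= arr2[0]]
--
--     return check_same_bst_or_not_rec(
--         left_tree_arr_1, left_tree_arr_2
--     ) and check_same_bst_or_not_rec(right_tree_arr_1, right_tree_arr_2)
-- ===== SOURCE B (Python) =====
-- def check_same_bst_or_not_rec(arr1, arr2):
--     # Build the BST each sequence produces (duplicates go right) and compare trees.
--     def build(arr):
--         root = None
--         for v in arr:
--             if root is None:
--                 root = [v, None, None]
--                 continue
--             node = root
--             while True:
--                 side = 1 if v < node[0] else 2
--                 if node[side] is None:
--                     node[side] = [v, None, None]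
--                     break
--                 node = node[side]
--         return root
--     return build(arr1) == build(arr2)
-- ===== Notes on version B (the rewrite author's own statement) =====
-- stated objective: alternative
-- what changed: B builds the actual BST from each insertion sequence with iterative pointer-chasing inserts and compares the two trees, instead of A's recursive partitioning of both arrays into left/right sublists at every level.
import Mathlib
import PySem

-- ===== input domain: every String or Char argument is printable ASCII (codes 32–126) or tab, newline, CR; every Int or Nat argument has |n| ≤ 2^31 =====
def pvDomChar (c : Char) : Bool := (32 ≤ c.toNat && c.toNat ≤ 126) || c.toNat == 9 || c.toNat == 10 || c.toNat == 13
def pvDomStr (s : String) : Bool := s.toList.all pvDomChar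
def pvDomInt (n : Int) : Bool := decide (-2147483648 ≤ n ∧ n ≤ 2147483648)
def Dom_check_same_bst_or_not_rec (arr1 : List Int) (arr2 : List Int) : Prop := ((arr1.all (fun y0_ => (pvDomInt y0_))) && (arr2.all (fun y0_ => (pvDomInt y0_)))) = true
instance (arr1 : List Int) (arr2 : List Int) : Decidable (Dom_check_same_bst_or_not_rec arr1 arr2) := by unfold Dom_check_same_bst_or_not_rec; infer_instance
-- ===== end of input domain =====

-- B builds the BST each insertion sequence produces and compares the trees, instead of
-- A's recursive left/right partitioning of both arrays; equal cost, different algorithm.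

-- ===== PORT A =====
def check_same_bst_or_not_rec (arr1 : List Int) (arr2 : List Int) : Bool :=
  if arr1.length ≠ arr2.length then false
  else match arr1, arr2 with
    | [], _ => true
    | _, [] => true
    | a :: t1, b :: t2 =>
      if a ≠ b then false
      else
        check_same_bst_or_not_rec (t1.filter (fun num => num < a)) (t2.filter (fun num => num < b)) &&
        check_same_bst_or_not_rec (t1.filter (fun num => a ≤ num)) (t2.filter (fun num => b ≤ num))
termination_by arr1.length
decreasing_by
  all_goals
    simp only [List.length_unattach, List.length_cons]
    exact Nat.lt_succ_of_le (le_trans (List.length_filter_le _ _) (by simp))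

-- ===== PORT B =====
inductive BST where
  | leaf : BST
  | node : Int → BST → BST → BST
deriving DecidableEq, Repr

def BST.insert : BST → Int → BST
  | .leaf, v => .node v .leaf .leaf
  | .node x l r, v => if v < x then .node x (l.insert v) r else .node x l (r.insert v)

def buildBST (arr : List Int) : BST := arr.foldl BST.insert .leaf

def check_same_bst_or_not_rec_alt (arr1 : List Int) (arr2 : List Int) : Bool :=
  buildBST arr1 == buildBST arr2

-- ===== PRECONDITION & SPEC =====
def Spec_check_same_bst_or_not_rec (arr1 : List Int) (arr2 : List Int) (out : Bool) : Prop := out = check_same_bst_or_not_rec_alt arr1 arr2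
instance (arr1 : List Int) (arr2 : List Int) (out : Bool) : Decidable (Spec_check_same_bst_or_not_rec arr1 arr2 out) := by unfold Spec_check_same_bst_or_not_rec; infer_instance

-- ===== CLAIM (what is proved, stated in full; the proofs are below) =====
def Claim_equal_check_same_bst_or_not_rec : Prop := ∀ (arr1 : List Int) (arr2 : List Int), Dom_check_same_bst_or_not_rec arr1 arr2 → Spec_check_same_bst_or_not_rec arr1 arr2 (check_same_bst_or_not_rec arr1 arr2)

-- ===== LEMMAS AND PROOFS =====

def BST.size : BST → Nat
  | .leaf => 0
  | .node _ l r => l.size + r.size + 1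

theorem size_insert (t : BST) (v : Int) : (t.insert v).size = t.size + 1 := by
  induction t with
  | leaf => simp [BST.insert, BST.size]
  | node x l r ihl ihr =>
    by_cases h : v < x <;> simp [BST.insert, h, BST.size, ihl, ihr] <;> omega

theorem size_foldl (xs : List Int) : ∀ t : BST, (xs.foldl BST.insert t).size = t.size + xs.length := by
  induction xs with
  | nil => simp
  | cons v xs ih => intro t; simp [List.foldl, ih, size_insert]; omega

theorem size_build (xs : List Int) : (buildBST xs).size = xs.length := by
  simpa [BST.size] using size_foldl xs .leaf

theorem foldl_insert_node (x : Int) (xs : List Int) :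
    ∀ l r : BST, xs.foldl BST.insert (.node x l r) =
      .node x ((xs.filter (fun v => v < x)).foldl BST.insert l)
              ((xs.filter (fun v => x ≤ v)).foldl BST.insert r) := by
  induction xs with
  | nil => intro l r; simp
  | cons v xs ih =>
    intro l r
    by_cases h : v < x
    · have h' : ¬ x ≤ v := by omega
      simp [List.foldl, List.filter, BST.insert, h, h', ih]
    · have h' : x ≤ v := by omega
      simp [List.foldl, List.filter, BST.insert, h, h', ih]

theorem build_cons (a : Int) (t : List Int) :
    buildBST (a :: t) =
      .node a (buildBST (t.filter (fun v => v < a))) (buildBST (t.filter (fun v => a ≤ v))) := by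
  simp [buildBST, List.foldl, BST.insert, foldl_insert_node]

theorem main_lemma : ∀ (n : Nat) (arr1 arr2 : List Int), arr1.length ≤ n →
    check_same_bst_or_not_rec arr1 arr2 = check_same_bst_or_not_rec_alt arr1 arr2 := by
  intro n
  induction n with
  | zero =>
    intro arr1 arr2 h
    have h1 : arr1 = [] := List.eq_nil_of_length_eq_zero (Nat.le_zero.mp h)
    subst h1
    cases arr2 with
    | nil => simp [check_same_bst_or_not_rec.eq_def, check_same_bst_or_not_rec_alt, buildBST]
    | cons b t2 =>
      have hs : buildBST [] ≠ buildBST (b :: t2) := by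
        intro he
        have := congrArg BST.size he
        simp [size_build] at this
      simp [check_same_bst_or_not_rec, check_same_bst_or_not_rec_alt, hs]
  | succ n ih =>
    intro arr1 arr2 h
    by_cases hlen : arr1.length = arr2.length
    · cases arr1 with
      | nil =>
        have : arr2 = [] := List.eq_nil_of_length_eq_zero hlen.symm
        subst this
        simp [check_same_bst_or_not_rec.eq_def, check_same_bst_or_not_rec_alt, buildBST]
      | cons a t1 =>
        cases arr2 with
        | nil => simp at hlen
        | cons b t2 =>
          by_cases hab : a = b
          · subst hab
            rw [show check_same_bst_or_not_rec (a :: t1) (a :: t2) =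
                (check_same_bst_or_not_rec (t1.filter (fun num => num < a)) (t2.filter (fun num => num < a)) &&
                 check_same_bst_or_not_rec (t1.filter (fun num => a ≤ num)) (t2.filter (fun num => a ≤ num))) from by
              rw [check_same_bst_or_not_rec.eq_def]; simp [hlen]]
            have hl1 : (t1.filter (fun num => num < a)).length ≤ n := by
              have := t1.length_filter_le (fun num => decide (num < a))
              simp at h; omega
            have hr1 : (t1.filter (fun num => a ≤ num)).length ≤ n := by
              have := t1.length_filter_le (fun num => decide (a ≤ num))
              simp at h; omega
            rw [ih _ _ hl1, ih _ _ hr1]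
            simp only [check_same_bst_or_not_rec_alt, build_cons]
            simp [Bool.beq_eq_decide_eq]
          · have hs : buildBST (a :: t1) ≠ buildBST (b :: t2) := by
              rw [build_cons, build_cons]
              intro he
              exact hab (by injection he)
            rw [check_same_bst_or_not_rec.eq_def]
            simp [hlen, hab, check_same_bst_or_not_rec_alt, hs]
    · have hs : buildBST arr1 ≠ buildBST arr2 := by
        intro he
        have := congrArg BST.size he
        rw [size_build, size_build] at this
        exact hlen this
      rw [check_same_bst_or_not_rec.eq_def]
      simp [hlen, check_same_bst_or_not_rec_alt, hs]

-- ===== VERDICT (by name: the statement is the Claim_ definition above) =====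
theorem check_same_bst_or_not_rec_spec : Claim_equal_check_same_bst_or_not_rec := by
  intro arr1 arr2 _
  exact main_lemma arr1.length arr1 arr2 (Nat.le_refl _)
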